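-- pv_equiv track=rewrite | github.com/JayFernandez42/NLPHW1 | data_exploration.py | stringify_labeled_doc
-- ===== SOURCE A (Python) =====
-- def stringify_labeled_doc(text, ner):
--   """
--   Returns a string representation of a tagged sentence from the dataset.
--   Named entities are grouped and formatted as [TAG token1 token2 ... tokenN].
--   BIO prefixes are stripped. 'O' tokens are ignored.
--   """
--   if not text or not ner:
--     return ""
--
--   result = []
--   current_entity = []
--   current_tag = None
--
--   for token, tag in zip(text, ner):
--     if tag.startswith("B-"):  # New entity starts
--       if current_entity:
--         result.append(f"[{current_tag} {' '.join(current_entity)}]")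
--       current_entity = [token]
--       current_tag = tag[2:]
--     elif tag.startswith("I-") and current_tag == tag[2:]:
--       current_entity.append(token)
--     else:
--       if current_entity:  # Close previous entity
--         result.append(f"[{current_tag} {' '.join(current_entity)}]")
--         current_entity = []
--         current_tag = None
--       if tag == "O":  # Non-entity word
--         result.append(token)
--
--   if current_entity:
--     result.append(f"[{current_tag} {' '.join(current_entity)}]")
--
--   return " ".join(result)
-- ===== SOURCE B (Python) =====
-- def stringify_labeled_doc(text, ner):
--     # Span-based single scan: on a "B-" tag, greedily consume the run of
--     # matching "I-" tags right away (lookahead) instead of keeping an open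
--     # entity in mutable state; "O" emits the bare token; anything else is dropped.
--     pairs = list(zip(text, ner))
--     parts = []
--     i, n = 0, len(pairs)
--     while i < n:
--         tok, tag = pairs[i]
--         if tag.startswith("B-"):
--             name = tag[2:]
--             j = i + 1
--             while j < n and pairs[j][1].startswith("I-") and pairs[j][1][2:] == name:
--                 j += 1
--             parts.append("[" + name + " " + " ".join(t for t, _ in pairs[i:j]) + "]")
--             i = j
--         elif tag == "O":
--             parts.append(tok)
--             i += 1
--         else:
--             i += 1
--     return " ".join(parts)
-- ===== Notes on version B (the rewrite author's own statement) =====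
-- stated objective: alternative
-- what changed: Replaces A's state machine (mutable current_entity/current_tag with deferred flushes) by a span-based scan that, at each B- tag, consumes the whole run of matching I- tags by lookahead and emits the bracketed entity immediately.
import Mathlib
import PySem

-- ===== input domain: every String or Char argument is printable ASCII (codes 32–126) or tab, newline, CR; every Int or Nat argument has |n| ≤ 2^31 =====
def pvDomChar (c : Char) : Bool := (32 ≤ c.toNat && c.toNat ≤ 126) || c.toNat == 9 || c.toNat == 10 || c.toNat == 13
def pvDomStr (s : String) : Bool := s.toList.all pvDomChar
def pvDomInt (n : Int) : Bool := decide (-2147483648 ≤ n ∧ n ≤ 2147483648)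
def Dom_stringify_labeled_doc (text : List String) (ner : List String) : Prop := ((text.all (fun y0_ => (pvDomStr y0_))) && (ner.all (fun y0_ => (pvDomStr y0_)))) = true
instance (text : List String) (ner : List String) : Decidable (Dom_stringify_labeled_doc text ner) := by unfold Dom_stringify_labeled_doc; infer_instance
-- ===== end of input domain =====

-- B replaces A's mutable-state entity accumulator by a span-based scan (lookahead run of matching I- tags); alternative decomposition, same cost.


-- ===== PORT A =====
-- f"[{current_tag} {' '.join(current_entity)}]"; current_tag is an Option (Python None);
-- getD "None" matches the f-string's rendering of None (unreachable while current_entity ≠ []).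
def pvFmtA (ct : Option String) (ce : List String) : String :=
  "[" ++ ct.getD "None" ++ " " ++ PySem.Str.join " " ce ++ "]"

-- the for-loop over zip(text, ner) with state (result, current_entity, current_tag),
-- including the trailing flush at the end of the loop
def pvLoopA : List (String × String) → List String → List String → Option String → List String
  | [], result, ce, ct => if ce.isEmpty then result else result ++ [pvFmtA ct ce]
  | (tok, tag) :: rest, result, ce, ct =>
    if PySem.Str.startswith tag "B-" then
      pvLoopA rest (if ce.isEmpty then result else result ++ [pvFmtA ct ce])
        [tok] (some (PySem.Str.slice tag (some 2) none))
    else if PySem.Str.startswith tag "I-" && (ct == some (PySem.Str.slice tag (some 2) none)) then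
      pvLoopA rest result (ce ++ [tok]) ct
    else
      pvLoopA rest
        ((if ce.isEmpty then result else result ++ [pvFmtA ct ce]) ++
          (if tag == "O" then [tok] else [])) [] none

def stringify_labeled_doc (text : List String) (ner : List String) : String :=
  if text.isEmpty || ner.isEmpty then ""
  else PySem.Str.join " " (pvLoopA (text.zip ner) [] [] none)

-- ===== PORT B =====
-- the inner-while condition: pairs[j][1].startswith("I-") and pairs[j][1][2:] == name
def pvIsI (name : String) (p : String × String) : Bool :=
  PySem.Str.startswith p.2 "I-" && (PySem.Str.slice p.2 (some 2) none == name)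

-- the outer while over the remaining pairs; the inner 'advance j while pvIsI' lookahead
-- is the takeWhile/dropWhile split of the rest of the list (pairs[i:j] = current :: run)
def pvGo : List (String × String) → List String
  | [] => []
  | (tok, tag) :: rest =>
    if PySem.Str.startswith tag "B-" then
      ("[" ++ PySem.Str.slice tag (some 2) none ++ " " ++
        PySem.Str.join " " (tok :: (rest.takeWhile (pvIsI (PySem.Str.slice tag (some 2) none))).map (·.1)) ++ "]")
        :: pvGo (rest.dropWhile (pvIsI (PySem.Str.slice tag (some 2) none)))
    else if tag == "O" then tok :: pvGo rest
    else pvGo rest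
termination_by ps => ps.length
decreasing_by
  · exact Nat.lt_succ_of_le (rest.dropWhile_sublist _).length_le
  · exact Nat.lt_succ_self _
  · exact Nat.lt_succ_self _

def stringify_labeled_doc_alt (text : List String) (ner : List String) : String :=
  PySem.Str.join " " (pvGo (text.zip ner))

-- ===== PRECONDITION & SPEC =====
def Spec_stringify_labeled_doc (text : List String) (ner : List String) (out : String) : Prop := out = stringify_labeled_doc_alt text ner
instance (text : List String) (ner : List String) (out : String) : Decidable (Spec_stringify_labeled_doc text ner out) := by unfold Spec_stringify_labeled_doc; infer_instance

-- ===== CLAIM (what is proved, stated in full; the proofs are below) =====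
def Claim_equal_stringify_labeled_doc : Prop := ∀ (text : List String) (ner : List String), Dom_stringify_labeled_doc text ner → Spec_stringify_labeled_doc text ner (stringify_labeled_doc text ner)

-- ===== LEMMAS AND PROOFS =====

theorem pv_B_not_I (tag : String) (h : PySem.Str.startswith tag "B-" = true) :
    PySem.Str.startswith tag "I-" = false := by
  simp only [PySem.Str.startswith_eq] at *
  rw [PySem.Chars.startswith_iff] at h
  rw [← Bool.not_eq_true, PySem.Chars.startswith_iff]
  intro hI
  obtain ⟨t1, h1⟩ := h
  obtain ⟨t2, h2⟩ := hI
  rw [← h1] at h2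
  simp at h2

theorem pvLoopA_go (n : Nat) : ∀ (ps : List (String × String)), ps.length ≤ n →
    (∀ result, pvLoopA ps result [] none = result ++ pvGo ps) ∧
    (∀ result ce name, ce ≠ [] →
      pvLoopA ps result ce (some name) =
        result ++ [pvFmtA (some name) (ce ++ (ps.takeWhile (pvIsI name)).map (·.1))] ++
          pvGo (ps.dropWhile (pvIsI name))) := by
  induction n with
  | zero =>
    intro ps hps
    have h0 : ps = [] := List.eq_nil_of_length_eq_zero (Nat.le_zero.mp hps)
    subst h0
    refine ⟨fun result => by simp [pvLoopA, pvGo], fun result ce name hce => by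
      simp [pvLoopA, pvGo, List.isEmpty_iff, hce]⟩
  | succ n ih =>
    intro ps hps
    match ps with
    | [] =>
      refine ⟨fun result => by simp [pvLoopA, pvGo], fun result ce name hce => by
        simp [pvLoopA, pvGo, List.isEmpty_iff, hce]⟩
    | (tok, tag) :: rest =>
      have hr : rest.length ≤ n := by simpa using Nat.succ_le_succ_iff.mp hps
      constructor
      · intro result
        by_cases hB : PySem.Str.startswith tag "B-" = true
        · conv_rhs => rw [pvGo]
          rw [pvLoopA, if_pos hB, if_pos hB]
          rw [(ih rest hr).2 _ [tok] _ (by simp)]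
          simp [pvFmtA]
        · conv_rhs => rw [pvGo]
          rw [pvLoopA, if_neg hB, if_neg hB, if_neg (by simp)]
          rw [(ih rest hr).1]
          by_cases hO : tag = "O" <;> simp [hO]
      · intro result ce name hce
        by_cases hB : PySem.Str.startswith tag "B-" = true
        · have hBI : PySem.Chars.startswith tag.toList ['I', '-'] = false := by
            simpa using pv_B_not_I tag hB
          have hnotI : ¬ (pvIsI name (tok, tag) = true) := by
            simp [pvIsI, hBI]
          rw [List.takeWhile_cons_of_neg hnotI, List.dropWhile_cons_of_neg hnotI]
          conv_rhs => rw [pvGo]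
          rw [pvLoopA, if_pos hB, if_pos hB, if_neg (by simp [hce])]
          rw [(ih rest hr).2 _ [tok] _ (by simp)]
          simp [pvFmtA]
        · by_cases hI : pvIsI name (tok, tag) = true
          · have hI' := hI
            simp only [pvIsI, Bool.and_eq_true, beq_iff_eq] at hI'
            rw [List.takeWhile_cons_of_pos hI, List.dropWhile_cons_of_pos hI]
            have hIc : PySem.Chars.startswith tag.toList ['I', '-'] = true := by
              simpa using hI'.1
            rw [pvLoopA, if_neg hB, if_pos (by simp [hIc, hI'.2])]
            rw [(ih rest hr).2 _ (ce ++ [tok]) _ (by simp)]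
            simp
          · have hcond : ¬ ((PySem.Str.startswith tag "I-" &&
                ((some name : Option String) == some (PySem.Str.slice tag (some 2) none))) = true) := by
              intro hc
              simp only [Bool.and_eq_true, beq_iff_eq, Option.some.injEq] at hc
              have hIc : PySem.Chars.startswith tag.toList ['I', '-'] = true := by
                simpa using hc.1
              exact hI (by simp [pvIsI, hIc, hc.2.symm])
            rw [List.takeWhile_cons_of_neg hI, List.dropWhile_cons_of_neg hI]
            conv_rhs => rw [pvGo]
            rw [pvLoopA, if_neg hB, if_neg hB, if_neg hcond]
            rw [(ih rest hr).1]
            by_cases hO : tag = "O" <;> simp [hO, List.isEmpty_iff, hce]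

-- ===== VERDICT (by name: the statement is the Claim_ definition above) =====
theorem stringify_labeled_doc_spec : Claim_equal_stringify_labeled_doc := by
  intro text ner _
  show stringify_labeled_doc text ner = stringify_labeled_doc_alt text ner
  unfold stringify_labeled_doc stringify_labeled_doc_alt
  by_cases ht : text = []
  · subst ht; simp [pvGo, PySem.Str.join]
  by_cases hn : ner = []
  · subst hn; simp [pvGo, PySem.Str.join, List.zip_nil_right]
  have h := (pvLoopA_go (text.zip ner).length (text.zip ner) le_rfl).1 []
  simp [List.isEmpty_iff, ht, hn, h]
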